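-- pv_equiv track=rewrite | github.com/darkfos/CodeLibrary | CodeWars/PYTHON/how_many_feelings.py | count_feelings
-- ===== SOURCE A (Python) =====
-- def count_feelings(st, arr):
--     #6 kyu
--
--     cnt: int = 0
--
--     for word in arr:
--         l_cnt: int = 0
--         local_st = list(st)
--         for ch in word:
--             if ch in local_st:
--                 l_cnt += 1
--                 local_st.pop(local_st.index(ch))
--                 continue
--             else:
--                 break
--
--         if l_cnt == len(word):
--             cnt += 1
--
--     return f"{cnt} feeling{'s' if cnt != 1 else ''}."
-- ===== SOURCE B (Python) =====
-- def count_feelings(st, arr):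
--     # Count words whose letters (as a multiset) are contained in st,
--     # by comparing per-character frequencies directly instead of
--     # consuming letters from a working copy one at a time.
--     cnt = sum(1 for word in arr
--               if all(word.count(c) <= st.count(c) for c in word))
--     return f"{cnt} feeling{'s' if cnt != 1 else ''}."
-- ===== Notes on version B (the rewrite author's own statement) =====
-- stated objective: simpler
-- what changed: Replaces A's per-word consume-a-working-copy scan (list(st) copy, membership test, index, pop, early break) with a direct frequency comparison: a word counts iff every character occurs in it no more often than in st.
import Mathlib
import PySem

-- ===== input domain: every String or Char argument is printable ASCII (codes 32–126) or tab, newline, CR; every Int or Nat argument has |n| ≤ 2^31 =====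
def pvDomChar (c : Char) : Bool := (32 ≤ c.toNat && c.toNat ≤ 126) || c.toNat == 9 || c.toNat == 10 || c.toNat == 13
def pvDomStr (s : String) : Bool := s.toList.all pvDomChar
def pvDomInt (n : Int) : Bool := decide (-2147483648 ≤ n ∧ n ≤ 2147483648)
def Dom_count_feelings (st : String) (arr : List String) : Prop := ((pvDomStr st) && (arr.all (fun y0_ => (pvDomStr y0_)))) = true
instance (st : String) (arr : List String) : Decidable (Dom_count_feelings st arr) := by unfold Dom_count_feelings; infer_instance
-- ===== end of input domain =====

-- B replaces A's per-word consume-a-working-copy scan (membership/index/pop with early break)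
-- by a direct per-character frequency comparison; objective: simpler.


-- ===== PORT A =====
-- inner 'for ch in word' loop: state = (l_cnt, local_st); 'break' returns l_cnt as it stands
def cfLoop (word : List Char) (lcnt : Nat) (localSt : List Char) : Nat :=
  match word with
  | [] => lcnt
  | ch :: rest =>
    if ch ∈ localSt then
      match PySem.List.index? localSt ch with
      | some i =>
        match PySem.List.pop? localSt (i : Int) with
        | some r => cfLoop rest (lcnt + 1) r.2
        | none => lcnt          -- unreachable: index? yields an in-range index
      | none => lcnt            -- unreachable: ch ∈ localSt was just checked
    else lcnt                   -- break

def count_feelings (st : String) (arr : List String) : String :=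
  let cnt : Int := arr.foldl (fun cnt word =>
    if cfLoop word.toList 0 st.toList = word.toList.length then cnt + 1 else cnt) 0
  String.ofList (PySem.Int.toChars cnt ++ " feeling".toList
    ++ (if cnt ≠ 1 then "s".toList else []) ++ ".".toList)

-- ===== PORT B =====
-- word.count(c) / st.count(c) for a single character c is List.count on the char lists
def count_feelings_alt (st : String) (arr : List String) : String :=
  let cnt : Int := (arr.map (fun word =>
    if word.toList.all (fun c => word.toList.count c ≤ st.toList.count c) then (1 : Int) else 0)).sum
  String.ofList (PySem.Int.toChars cnt ++ " feeling".toList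
    ++ (if cnt ≠ 1 then "s".toList else []) ++ ".".toList)

-- ===== PRECONDITION & SPEC =====
def Spec_count_feelings (st : String) (arr : List String) (out : String) : Prop := out = count_feelings_alt st arr
instance (st : String) (arr : List String) (out : String) : Decidable (Spec_count_feelings st arr out) := by unfold Spec_count_feelings; infer_instance

-- ===== CLAIM (what is proved, stated in full; the proofs are below) =====
def Claim_equal_count_feelings : Prop := ∀ (st : String) (arr : List String), Dom_count_feelings st arr → Spec_count_feelings st arr (count_feelings st arr)

-- ===== LEMMAS AND PROOFS =====

theorem eraseIdx_append_cons {α : Type} (pre suf : List α) (a : α) :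
    (pre ++ a :: suf).eraseIdx pre.length = pre ++ suf := by
  induction pre with
  | nil => simp
  | cons x xs ih => simp [ih]

-- the consume step: with ch available, A pops the first occurrence, i.e. erases ch
theorem cfLoop_cons_mem (ch : Char) (rest localSt : List Char) (lcnt : Nat)
    (h : ch ∈ localSt) :
    cfLoop (ch :: rest) lcnt localSt = cfLoop rest (lcnt + 1) (localSt.erase ch) := by
  obtain ⟨k, hk⟩ := Option.isSome_iff_exists.mp ((PySem.List.index?_isSome_iff localSt ch).mpr h)
  obtain ⟨pre, suf, hdec, hlen, hnot⟩ := (PySem.List.index?_eq_some_iff localSt ch k).mp hk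
  have hlt : k < localSt.length := by subst hdec hlen; simp
  simp only [cfLoop, if_pos h, hk, PySem.List.pop?_natCast localSt k hlt]
  congr 1
  subst hdec hlen
  rw [List.erase_append_right _ hnot, eraseIdx_append_cons]
  simp

-- the loop reaches the end of the word iff word's letters fit into localSt as a multiset
theorem cfLoop_eq_iff (word : List Char) (lcnt : Nat) (localSt : List Char) :
    cfLoop word lcnt localSt = lcnt + word.length ↔
      ∀ c, word.count c ≤ localSt.count c := by
  induction word generalizing lcnt localSt with
  | nil => simp [cfLoop]
  | cons ch rest ih =>
    by_cases h : ch ∈ localSt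
    · rw [cfLoop_cons_mem ch rest localSt lcnt h]
      have key : (∀ c, rest.count c ≤ (localSt.erase ch).count c) ↔
          (∀ c, (ch :: rest).count c ≤ localSt.count c) := by
        have hpos : 0 < localSt.count ch := List.count_pos_iff.mpr h
        constructor <;> intro hc c <;> have h1 := hc c <;> by_cases hceq : c = ch
        · subst hceq
          rw [List.count_erase_self] at h1
          rw [List.count_cons_self]
          omega
        · rw [List.count_erase_of_ne hceq] at h1
          rw [List.count_cons_of_ne (Ne.symm hceq)]
          exact h1
        · subst hceq
          rw [List.count_cons_self] at h1
          rw [List.count_erase_self]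
          omega
        · rw [List.count_cons_of_ne (Ne.symm hceq)] at h1
          rw [List.count_erase_of_ne hceq]
          exact h1
      rw [← key, ← ih (lcnt + 1) (localSt.erase ch)]
      constructor <;> intro he <;> simp only [List.length_cons] at * <;> omega
    · simp only [cfLoop, if_neg h, List.length_cons]
      constructor
      · intro he; omega
      · intro hc
        have h1 := hc ch
        rw [List.count_cons_self, List.count_eq_zero_of_not_mem h] at h1
        omega

-- per word: A's acceptance test equals B's boolean
theorem word_ok_iff (word st : List Char) :
    (cfLoop word 0 st = word.length) ↔
      (word.all (fun c => word.count c ≤ st.count c) = true) := by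
  rw [show word.length = 0 + word.length from (Nat.zero_add _).symm, cfLoop_eq_iff]
  simp only [List.all_eq_true, decide_eq_true_eq]
  constructor
  · intro h c _; exact h c
  · intro h c
    by_cases hm : c ∈ word
    · exact h c hm
    · rw [List.count_eq_zero_of_not_mem hm]; omega

theorem counts_agree (st : String) (arr : List String) :
    arr.foldl (fun cnt word =>
      if cfLoop word.toList 0 st.toList = word.toList.length then cnt + 1 else cnt) (0 : Int)
    = (arr.map (fun word =>
        if word.toList.all (fun c => word.toList.count c ≤ st.toList.count c) then (1 : Int) else 0)).sum := by
  have hA := PySem.List.foldl_count_if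
    (fun word : String => decide (cfLoop word.toList 0 st.toList = word.toList.length)) arr 0
  have hB := PySem.List.sum_map_ite_one_zero
    (fun word : String => word.toList.all (fun c => word.toList.count c ≤ st.toList.count c)) arr
  simp only [decide_eq_true_eq] at hA
  rw [hA, hB, zero_add, Nat.cast_inj]
  apply List.countP_congr
  intro word _
  simp only [decide_eq_true_eq]
  exact word_ok_iff word.toList st.toList

-- ===== VERDICT (by name: the statement is the Claim_ definition above) =====
theorem count_feelings_spec : Claim_equal_count_feelings := by
  intro st arr _
  unfold Spec_count_feelings count_feelings count_feelings_alt
  rw [counts_agree]
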